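-- pv_equiv track=rewrite | github.com/basilegithub/General-number-field-sieve | src/build_matrix.py | reduce_sparse_matrix
-- ===== SOURCE A (Python) =====
-- def reduce_sparse_matrix(matrix, pairs):
--     flag = True
--     while flag:
--         flag = False
--
--         singleton_queue = [index for index, row in enumerate(matrix) if len(row) == 1]
--         active_cols = set(range(len(pairs)))
--
--         flag = len(singleton_queue)
--
--         while singleton_queue:
--             index = singleton_queue.pop()
--
--             if len(matrix[index]) != 1: continue
--             coeff = next(iter(matrix[index]))
--
--             for j, row in enumerate(matrix):
--                 if j != index and coeff in row:
--                         row.remove(coeff)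
--                         if len(row) == 1: singleton_queue.append(j)
--
--             matrix[index].clear()
--             active_cols.discard(coeff)
--
--         matrix = [row for row in matrix if row]
--
--         pairs = [pairs[index] for index in sorted(active_cols)]
--
--         mapping = {old: new for new, old in enumerate(sorted(active_cols))}
--         matrix = [{mapping[c] for c in row if c in mapping} for row in matrix]
--
--         active_cols = set(range(len(pairs)))
--         target_n_cols = len(matrix)+10
--         to_delete = len(pairs) - target_n_cols
--         current_len_row = 2
--
--         while to_delete >= current_len_row-1:
--
--             index = -1
--             for i in range(len(matrix)):
--                 if len(matrix[i]) == current_len_row: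
--                     flag = True
--                     index = i
--                     break
--
--             if index != -1:
--                 for coeff in matrix[index]:
--                     active_cols.discard(coeff)
--
--                     for j, row in enumerate(matrix):
--                         if j != index and coeff in row:
--                             row.discard(coeff)
--
--                 to_delete -= current_len_row-1
--
--                 matrix[index].clear()
--
--             else:
--                 current_len_row += 1
--
--         matrix = [row for row in matrix if row]
--
--         pairs = [pairs[index] for index in sorted(active_cols)]
--
--         mapping = {old: new for new, old in enumerate(sorted(active_cols))}
--         matrix = [{mapping[c] for c in row if c in mapping} for row in matrix]
--
--     return matrix, pairs
-- ===== SOURCE B (Python) =====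
-- def compress(matrix, pairs, removed):
--     # renumber surviving columns in one pass; rows become sorted sets of new ids
--     rank = {}
--     new_pairs = []
--     for c in range(len(pairs)):
--         if c not in removed:
--             rank[c] = len(new_pairs)
--             new_pairs.append(pairs[c])
--     new_matrix = [set(sorted(rank[c] for c in row if c in rank)) for row in matrix if row]
--     return new_matrix, new_pairs
--
--
-- def reduce_sparse_matrix(matrix, pairs):
--     changed = True
--     while changed:
--         changed = False
--
--         # singleton cascade, driven by a column -> rows reverse index
--         occ = {}
--         for j, row in enumerate(matrix):
--             for c in row:
--                 occ.setdefault(c, []).append(j)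
--         stack = [j for j, row in enumerate(matrix) if len(row) == 1]
--         if stack:
--             changed = True
--         removed = set()
--         while stack:
--             i = stack.pop()
--             if len(matrix[i]) != 1:
--                 continue
--             c = next(iter(matrix[i]))
--             for j in occ.get(c, []):
--                 if j != i:
--                     matrix[j].discard(c)
--                     if len(matrix[j]) == 1:
--                         stack.append(j)
--             occ[c] = []
--             matrix[i].clear()
--             removed.add(c)
--         matrix, pairs = compress(matrix, pairs, removed)
--
--         # short-row elimination: nested loop, one row length at a time
--         occ = {}
--         for j, row in enumerate(matrix):
--             for c in row:
--                 occ.setdefault(c, []).append(j)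
--         removed = set()
--         budget = len(pairs) - len(matrix) - 10
--         L = 2
--         while budget >= L - 1:
--             i = next((j for j, row in enumerate(matrix) if len(row) == L), -1)
--             if i == -1:
--                 L += 1
--                 continue
--             changed = True
--             victims = list(matrix[i])
--             for c in victims:
--                 removed.add(c)
--                 for j in occ.get(c, []):
--                     if j != i:
--                         matrix[j].discard(c)
--             for c in victims:
--                 occ[c] = []
--             matrix[i].clear()
--             budget -= L - 1
--         matrix, pairs = compress(matrix, pairs, removed)
--     return matrix, pairs
-- ===== Notes on version B (the rewrite author's own statement) =====
-- stated objective: alternative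
-- what changed: B drives both elimination phases through a column-to-rows reverse index plus a removed-column set (instead of A's full-matrix rescan per eliminated column and erase-from-active-set bookkeeping), renumbers surviving columns with a single rank-dict pass shared by both phases instead of A's sorted(active_cols)/mapping rebuild, and runs the short-row elimination as a nested per-row-length loop instead of A's flat loop.
import Mathlib
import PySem

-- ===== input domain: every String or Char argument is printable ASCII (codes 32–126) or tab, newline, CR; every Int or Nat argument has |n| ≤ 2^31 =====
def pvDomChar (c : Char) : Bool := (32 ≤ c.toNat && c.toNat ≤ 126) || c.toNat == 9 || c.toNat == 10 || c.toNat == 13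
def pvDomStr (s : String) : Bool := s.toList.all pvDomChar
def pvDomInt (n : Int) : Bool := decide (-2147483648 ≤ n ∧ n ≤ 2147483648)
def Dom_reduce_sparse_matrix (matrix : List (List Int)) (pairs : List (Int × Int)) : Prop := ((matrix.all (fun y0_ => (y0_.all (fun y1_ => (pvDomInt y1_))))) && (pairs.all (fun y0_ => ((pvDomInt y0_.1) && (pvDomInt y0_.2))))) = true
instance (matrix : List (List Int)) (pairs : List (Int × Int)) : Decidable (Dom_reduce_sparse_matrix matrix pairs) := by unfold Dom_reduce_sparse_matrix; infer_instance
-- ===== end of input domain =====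

-- B re-implements the reduction differently: a column→rows reverse index drives the
-- eliminations, a one-pass rank-dict renumbering (shared helper) replaces the sorted-set
-- compaction, and the short-row phase is a nested per-row-length loop; return value only —
-- both Pythons mutate the row sets of their argument in place.
-- Python rows are SETS (list[set[int]]): a row set is represented as a Lean list of its distinct
-- elements; set-comprehension results are materialised in ascending column order (Python's set
-- iteration order is not part of the value; the harness compares rows as finite sets).

-- ===== PORT A =====
-- queue = [index for index, row in enumerate(matrix) if len(row) == 1]
def sglIdx : List (List Int) → Nat → List Nat
  | [], _ => []
  | r :: rs, j => if r.length == 1 then j :: sglIdx rs (j + 1) else sglIdx rs (j + 1)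

-- {mapping[c] for c in row if c in mapping}, mapping = rank in act: the resulting set, listed ascending
def remapRow (act : List Int) (row : List Int) : List Int :=
  (List.range act.length).filterMap (fun r => if act.getD r 0 ∈ row then some ((r : Int)) else none)

-- inner 'for j, row in enumerate(matrix): if j != index and coeff in row: row.remove(coeff); if len(row)==1: queue.append(j)'
def passA : List (List Int) → Nat → Nat → Int → List (List Int) × List Nat
  | [], _, _, _ => ([], [])
  | r :: rs, j, index, coeff =>
    let rest := passA rs (j + 1) index coeff
    if j ≠ index ∧ coeff ∈ r then
      let r' := r.erase coeff
      (r' :: rest.1, if r'.length == 1 then j :: rest.2 else rest.2)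
    else (r :: rest.1, rest.2)

-- the singleton cascade; queue stored most-recently-appended first (Python pops from the end)
def cascadeA : Nat → List (List Int) → List Nat → List Int → List (List Int) × List Int
  | 0, m, _, act => (m, act)
  | _ + 1, m, [], act => (m, act)
  | fuel + 1, m, index :: rest, act =>
    if (m.getD index []).length ≠ 1 then cascadeA fuel m rest act
    else
      let coeff := (m.getD index []).headD 0
      let p := passA m 0 index coeff
      cascadeA fuel (p.1.set index []) (p.2.reverse ++ rest) (act.erase coeff)

-- inner 'for j, row in enumerate(matrix): if j != index and coeff in row: row.discard(coeff)'
def passD : List (List Int) → Nat → Nat → Int → List (List Int)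
  | [], _, _, _ => []
  | r :: rs, j, index, coeff =>
    (if j ≠ index ∧ coeff ∈ r then r.erase coeff else r) :: passD rs (j + 1) index coeff

-- 'for coeff in matrix[index]: active_cols.discard(coeff); <inner loop>'
def elimA (m : List (List Int)) (act : List Int) (i : Nat) : List (List Int) × List Int :=
  (m.getD i []).foldl (fun st coeff => (passD st.1 0 i coeff, st.2.erase coeff)) (m, act)

def phase2A : Nat → List (List Int) → List Int → Int → Int → Bool → List (List Int) × List Int × Bool
  | 0, m, act, _, _, flag => (m, act, flag)
  | fuel + 1, m, act, td, clr, flag =>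
    if td ≥ clr - 1 then
      match m.findIdx? (fun row => (row.length : Int) == clr) with
      | some i =>
        let res := elimA m act i
        phase2A fuel (res.1.set i []) res.2 (td - (clr - 1)) clr true
      | none => phase2A fuel m act td (clr + 1) flag
    else (m, act, flag)

-- one execution of the outer 'while flag' body
def roundA (m : List (List Int)) (pairs : List (Int × Int)) :
    List (List Int) × List (Int × Int) × Bool :=
  let q0 := (sglIdx m 0).reverse
  let flag1 := !q0.isEmpty
  let fuel1 := m.foldl (fun a r => a + r.length) 0 + q0.length + 1
  let c := cascadeA fuel1 m q0 (PySem.List.pyRange 0 (pairs.length) 1)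
  let m1 := c.1.filter (fun r => !r.isEmpty)
  let act1 := PySem.List.sorted c.2 (fun x => x)
  let p1 := act1.map (fun cc => pairs.getD cc.toNat (0, 0))
  let m2 := m1.map (remapRow act1)
  let td := (p1.length : Int) - ((m2.length : Int) + 10)
  let r2 := phase2A (2 * p1.length + 4) m2 (PySem.List.pyRange 0 (p1.length) 1) td 2 flag1
  let m3 := r2.1.filter (fun r => !r.isEmpty)
  let act2 := PySem.List.sorted r2.2.1 (fun x => x)
  let p2 := act2.map (fun cc => p1.getD cc.toNat (0, 0))
  let m4 := m3.map (remapRow act2)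
  (m4, p2, r2.2.2)

def outerA : Nat → List (List Int) → List (Int × Int) → List (List Int) × List (Int × Int)
  | 0, m, p => (m, p)
  | fuel + 1, m, p =>
    let r := roundA m p
    if r.2.2 then outerA fuel r.1 r.2.1 else (r.1, r.2.1)

def reduce_sparse_matrix (matrix : List (List Int)) (pairs : List (Int × Int)) :
    List (List Int) × (List (Int × Int)) :=
  outerA (matrix.length + 2) matrix pairs

-- ===== PORT B =====
-- stack = [j for j, row in enumerate(matrix) if len(row) == 1]
def enumSingles (mx : List (List Int)) : List Nat :=
  (PySem.List.enumerate mx).filterMap (fun pr => if pr.2.length == 1 then some pr.1.toNat else none)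

-- 'for j, row in enumerate(matrix): for c in row: occ.setdefault(c, []).append(j)'
def buildOcc (mx : List (List Int)) (dd : PySem.Dict Int (List Nat)) : PySem.Dict Int (List Nat) :=
  (PySem.List.enumerate mx).foldl
    (fun dd pr => pr.2.foldl (fun dd cc => dd.modify cc [] (· ++ [pr.1.toNat])) dd) dd

-- 'for j in occ.get(c, []): if j != i: matrix[j].discard(c); if len(matrix[j])==1: stack.append(j)'
def touchB (col : Int) (src : Nat) (rws : List Nat) (st : List (List Int) × List Nat) :
    List (List Int) × List Nat :=
  rws.foldl (fun st rj =>
    if rj == src then st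
    else
      let rowL := (st.1.getD rj []).erase col
      (st.1.set rj rowL, if rowL.length == 1 then rj :: st.2 else st.2)) st

structure CasSt where
  mat : List (List Int)
  occ : PySem.Dict Int (List Nat)
  rem : PySem.Set Int
  deriving Repr, DecidableEq

def cascadeB : Nat → List Nat → CasSt → List (List Int) × PySem.Set Int
  | 0, _, st => (st.mat, st.rem)
  | _ + 1, [], st => (st.mat, st.rem)
  | gas + 1, src :: more, st =>
    if (st.mat.getD src []).length ≠ 1 then cascadeB gas more st
    else
      let col := (st.mat.getD src []).headD 0
      let rr := touchB col src (st.occ.getD col []) (st.mat, [])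
      cascadeB gas (rr.2 ++ more)
        ⟨rr.1.set src [], st.occ.insert col [], PySem.Set.add st.rem col⟩

-- compress(matrix, pairs, removed): one-pass renumbering of the surviving columns
def rankFold (prs : List (Int × Int)) (rem : PySem.Set Int) :
    PySem.Dict Int Int × List (Int × Int) :=
  (PySem.List.pyRange 0 (prs.length : Int) 1).foldl
    (fun st cc =>
      if PySem.Set.contains rem cc then st
      else (st.1.insert cc (st.2.length : Int), st.2 ++ [prs.getD cc.toNat (0, 0)]))
    (PySem.Dict.empty, [])

def compressB (mx : List (List Int)) (prs : List (Int × Int)) (rem : PySem.Set Int) :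
    List (List Int) × List (Int × Int) :=
  let rk := rankFold prs rem
  ((mx.filter (fun rr => !rr.isEmpty)).map
      (fun rowL => PySem.List.sorted (rowL.filterMap (fun cc => rk.1.get? cc)) (fun x => x)),
    rk.2)

-- i = next((j for j, row in enumerate(matrix) if len(row) == L), -1)
def findB (mx : List (List Int)) (L : Int) : Option Nat :=
  ((PySem.List.enumerate mx).find? (fun pr => (pr.2.length : Int) == L)).map (fun pr => pr.1.toNat)

-- 'for j in occ.get(c, []): if j != i: matrix[j].discard(c)'
def touchD (col : Int) (src : Nat) (rws : List Nat) (mx : List (List Int)) : List (List Int) :=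
  rws.foldl (fun mx rj => if rj == src then mx else mx.set rj ((mx.getD rj []).erase col)) mx

-- process the chosen short row via the reverse index, then blank its occ entries
def elimB (mx : List (List Int)) (occ : PySem.Dict Int (List Nat)) (rem : PySem.Set Int) (ri : Nat) :
    List (List Int) × PySem.Dict Int (List Nat) × PySem.Set Int :=
  let rowL := mx.getD ri []
  let st := rowL.foldl (fun (st : List (List Int) × PySem.Set Int) col =>
      (touchD col ri (occ.getD col []) st.1, PySem.Set.add st.2 col)) (mx, rem)
  let occ' := rowL.foldl (fun dd col => dd.insert col []) occ
  (st.1.set ri [], occ', st.2)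

structure P2St where
  mat : List (List Int)
  occ : PySem.Dict Int (List Nat)
  rem : PySem.Set Int
  td : Int
  flag : Bool
  deriving Repr, DecidableEq

-- inner 'while budget >= L - 1' at a fixed row length L; the Bool says "no such row: go to L+1"
def p2InnerB : Nat → P2St → Int → Nat × P2St × Bool
  | 0, st, _ => (0, st, false)
  | f + 1, st, L =>
    if st.td ≥ L - 1 then
      match findB st.mat L with
      | some ri =>
        let e := elimB st.mat st.occ st.rem ri
        p2InnerB f ⟨e.1, e.2.1, e.2.2, st.td - (L - 1), true⟩ L
      | none => (f, st, true)
    else (f + 1, st, false)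

-- outer loop over the row length L
def p2OuterB : Nat → Nat → P2St → Int → P2St
  | 0, _, st, _ => st
  | fo + 1, fi, st, L =>
    let rr := p2InnerB fi st L
    if rr.2.2 then p2OuterB fo rr.1 rr.2.1 (L + 1) else rr.2.1

-- one execution of the 'while changed' body
def roundB (mx : List (List Int)) (prs : List (Int × Int)) :
    List (List Int) × List (Int × Int) × Bool :=
  let stk := (enumSingles mx).reverse
  let changed1 := !stk.isEmpty
  let fuel1 := mx.foldl (fun a rr => a + rr.length) 0 + stk.length + 1
  let cc := cascadeB fuel1 stk ⟨mx, buildOcc mx PySem.Dict.empty, PySem.Set.empty⟩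
  let cm := compressB cc.1 prs cc.2
  let budget := (cm.2.length : Int) - (cm.1.length : Int) - 10
  let r2 := p2OuterB (2 * cm.2.length + 5) (2 * cm.2.length + 4)
      ⟨cm.1, buildOcc cm.1 PySem.Dict.empty, PySem.Set.empty, budget, changed1⟩ 2
  let out := compressB r2.mat cm.2 r2.rem
  (out.1, out.2, r2.flag)

def outerB : Nat → List (List Int) × List (Int × Int) × Bool → List (List Int) × List (Int × Int)
  | 0, st => (st.1, st.2.1)
  | gas + 1, st =>
    if st.2.2 then outerB gas (roundB st.1 st.2.1) else (st.1, st.2.1)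

def reduce_sparse_matrix_alt (matrix : List (List Int)) (pairs : List (Int × Int)) :
    List (List Int) × (List (Int × Int)) :=
  outerB (matrix.length + 2) (matrix, pairs, true)

-- ===== PRECONDITION & SPEC =====
-- The Python argument is list[set[int]]: Pre_ admits exactly the lists that represent a list of
-- sets, i.e. no duplicate entries inside a row (every input the Python function ever receives).
def Pre_reduce_sparse_matrix (matrix : List (List Int)) (pairs : List (Int × Int)) : Prop :=
  ∀ row ∈ matrix, row.Nodup

instance (matrix : List (List Int)) (pairs : List (Int × Int)) :
    Decidable (Pre_reduce_sparse_matrix matrix pairs) := by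
  unfold Pre_reduce_sparse_matrix; infer_instance

def pvWitness_reduce_sparse_matrix : List (List Int) × (List (Int × Int)) :=
  ([[0], [0, 1]], [(1, 2), (3, 4)])

def Spec_reduce_sparse_matrix (matrix : List (List Int)) (pairs : List (Int × Int))
    (out : List (List Int) × (List (Int × Int))) : Prop :=
  out = reduce_sparse_matrix_alt matrix pairs

instance (matrix : List (List Int)) (pairs : List (Int × Int))
    (out : List (List Int) × (List (Int × Int))) :
    Decidable (Spec_reduce_sparse_matrix matrix pairs out) := by
  unfold Spec_reduce_sparse_matrix; infer_instance

-- ===== CLAIM (what is proved, stated in full; the proofs are below) =====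
def Claim_equal_reduce_sparse_matrix : Prop :=
  ∀ (matrix : List (List Int)) (pairs : List (Int × Int)),
    Dom_reduce_sparse_matrix matrix pairs → Pre_reduce_sparse_matrix matrix pairs →
      Spec_reduce_sparse_matrix matrix pairs (reduce_sparse_matrix matrix pairs)

-- ===== LEMMAS AND PROOFS =====

-- small utilities ------------------------------------------------------------
theorem getD_set_self {m : List (List Int)} {j : Nat} (h : j < m.length) (v : List Int) :
    (m.set j v).getD j [] = v := by
  rw [List.getD_eq_getElem?_getD, List.getElem?_set]
  simp [h]

theorem getD_set_ne {m : List (List Int)} {j k : Nat} (h : j ≠ k) (v : List Int) :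
    (m.set j v).getD k [] = m.getD k [] := by
  rw [List.getD_eq_getElem?_getD, List.getElem?_set, if_neg h, ← List.getD_eq_getElem?_getD]

theorem getD_set_nil_self (m : List (List Int)) (j : Nat) : (m.set j []).getD j [] = [] := by
  rw [List.getD_eq_getElem?_getD, List.getElem?_set, if_pos rfl]
  split_ifs <;> rfl

theorem getD_of_le {m : List (List Int)} {k : Nat} (h : m.length ≤ k) : m.getD k [] = [] :=
  List.getD_eq_default _ _ h

theorem getD_mem {m : List (List Int)} {k : Nat} (h : k < m.length) : m.getD k [] ∈ m := by
  rw [List.getD_eq_getElem _ _ h]; exact List.getElem_mem h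

theorem eq_singleton_of_length_one {l : List Int} (h : l.length = 1) : l = [l.headD 0] := by
  cases l with
  | nil => simp at h
  | cons a t => cases t with
    | nil => rfl
    | cons b t' => simp at h

-- ---- occL: the specification of the reverse index: rows (ascending) whose row set contains c
def occL : List (List Int) → Nat → Int → List Nat
  | [], _, _ => []
  | r :: rs, j, c => if c ∈ r then j :: occL rs (j + 1) c else occL rs (j + 1) c

theorem occL_mem (rs : List (List Int)) (j0 : Nat) (c : Int) (k : Nat) :
    k ∈ occL rs j0 c ↔ ∃ i, i < rs.length ∧ k = j0 + i ∧ c ∈ rs.getD i [] := by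
  induction rs generalizing j0 k with
  | nil => simp [occL]
  | cons r rs ih =>
    simp only [occL]
    constructor
    · intro h
      by_cases hc : c ∈ r
      · rw [if_pos hc] at h
        rcases List.mem_cons.1 h with rfl | h'
        · exact ⟨0, by simp, by omega, by simpa using hc⟩
        · obtain ⟨i, hi, hk, hm⟩ := (ih (j0 + 1) k).1 h'
          exact ⟨i + 1, by simpa using Nat.succ_lt_succ hi, by omega, by simpa using hm⟩
      · rw [if_neg hc] at h
        obtain ⟨i, hi, hk, hm⟩ := (ih (j0 + 1) k).1 h
        exact ⟨i + 1, by simpa using Nat.succ_lt_succ hi, by omega, by simpa using hm⟩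
    · rintro ⟨i, hi, rfl, hm⟩
      cases i with
      | zero =>
        simp only [List.getD_cons_zero] at hm
        rw [if_pos hm]
        simp
      | succ i =>
        simp only [List.getD_cons_succ] at hm
        have hmem : j0 + (i + 1) ∈ occL rs (j0 + 1) c :=
          (ih (j0 + 1) (j0 + (i + 1))).2
            ⟨i, by simp only [List.length_cons] at hi; omega, by omega, hm⟩
        by_cases hc : c ∈ r
        · rw [if_pos hc]; exact List.mem_cons_of_mem _ hmem
        · rw [if_neg hc]; exact hmem

theorem occL_ge (rs : List (List Int)) (j0 : Nat) (c : Int) : ∀ k ∈ occL rs j0 c, j0 ≤ k := by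
  intro k hk
  obtain ⟨i, _, rfl, _⟩ := (occL_mem rs j0 c k).1 hk
  omega

theorem occL_pairwise (rs : List (List Int)) (j0 : Nat) (c : Int) :
    (occL rs j0 c).Pairwise (· < ·) := by
  induction rs generalizing j0 with
  | nil => simp [occL]
  | cons r rs ih =>
    simp only [occL]
    by_cases hc : c ∈ r
    · rw [if_pos hc]
      exact List.pairwise_cons.2 ⟨fun k hk => lt_of_lt_of_le (Nat.lt_succ_self j0) (occL_ge _ _ _ k hk), ih (j0 + 1)⟩
    · rw [if_neg hc]; exact ih (j0 + 1)

theorem occL_mem_zero (m : List (List Int)) (c : Int) (k : Nat) :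
    k ∈ occL m 0 c ↔ k < m.length ∧ c ∈ m.getD k [] := by
  rw [occL_mem]
  constructor
  · rintro ⟨i, hi, rfl, hm⟩; simpa using ⟨hi, hm⟩
  · rintro ⟨hk, hm⟩; exact ⟨k, hk, by omega, hm⟩

theorem occL_nodup (rs : List (List Int)) (j0 : Nat) (c : Int) : (occL rs j0 c).Nodup :=
  (occL_pairwise rs j0 c).imp (fun h => Nat.ne_of_lt h)

theorem eq_of_mem_iff_pairwise {l₁ l₂ : List Nat}
    (h₁ : l₁.Pairwise (· < ·)) (h₂ : l₂.Pairwise (· < ·))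
    (h : ∀ k, k ∈ l₁ ↔ k ∈ l₂) : l₁ = l₂ := by
  have hperm : l₁.Perm l₂ :=
    (List.perm_ext_iff_of_nodup (h₁.imp fun h => Nat.ne_of_lt h)
      (h₂.imp fun h => Nat.ne_of_lt h)).2 h
  exact List.eq_of_perm_of_sorted (fun a b _ _ hab hba => by omega) h₁ h₂ hperm

theorem occL_congr {m m' : List (List Int)} (c : Int) (hlen : m'.length = m.length)
    (h : ∀ k, c ∈ m'.getD k [] ↔ c ∈ m.getD k []) : occL m' 0 c = occL m 0 c := by
  apply eq_of_mem_iff_pairwise (occL_pairwise _ _ _) (occL_pairwise _ _ _)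
  intro k; rw [occL_mem_zero, occL_mem_zero, hlen, h]

theorem occL_eq_nil {m : List (List Int)} (c : Int)
    (h : ∀ k, c ∉ m.getD k []) : occL m 0 c = [] := by
  rw [List.eq_nil_iff_forall_not_mem]
  intro k hk
  exact h k ((occL_mem_zero m c k).1 hk).2

-- ---- buildOcc = occL on matrices with duplicate-free rows
theorem touchB_cons_pos (c : Int) (idx j : Nat) (js : List Nat) (m : List (List Int))
    (acc : List Nat) (h : j = idx) :
    touchB c idx (j :: js) (m, acc) = touchB c idx js (m, acc) := by
  simp [touchB, h]

theorem touchB_cons_neg (c : Int) (idx j : Nat) (js : List Nat) (m : List (List Int))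
    (acc : List Nat) (h : ¬ j = idx) :
    touchB c idx (j :: js) (m, acc) =
      touchB c idx js (m.set j ((m.getD j []).erase c),
        if ((m.getD j []).erase c).length == 1 then j :: acc else acc) := by
  simp [touchB, h]

theorem touchD_cons_pos (c : Int) (idx j : Nat) (js : List Nat) (m : List (List Int))
    (h : j = idx) : touchD c idx (j :: js) m = touchD c idx js m := by
  simp [touchD, h]

theorem touchD_cons_neg (c : Int) (idx j : Nat) (js : List Nat) (m : List (List Int))
    (h : ¬ j = idx) :
    touchD c idx (j :: js) m = touchD c idx js (m.set j ((m.getD j []).erase c)) := by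
  simp [touchD, h]

theorem buildOcc_go (c : Int) : ∀ (rs : List (List Int)) (j0 : Nat) (d : PySem.Dict Int (List Nat)),
    (∀ r ∈ rs, r.Nodup) →
    ((PySem.List.enumerate rs (j0 : Int)).foldl
        (fun d p => p.2.foldl (fun d c => d.modify c [] (· ++ [p.1.toNat])) d) d).getD c []
      = d.getD c [] ++ occL rs j0 c := by
  intro rs
  induction rs with
  | nil => intro j0 d _; simp [PySem.List.enumerate_nil, occL]
  | cons r rs ih =>
    intro j0 d hnod
    rw [PySem.List.enumerate_cons]
    simp only [List.foldl_cons, occL]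
    have hs1 : ((j0 : Int) + 1) = ((j0 + 1 : Nat) : Int) := by push_cast; ring
    rw [hs1, ih (j0 + 1) _ (fun r hr => hnod r (List.mem_cons_of_mem _ hr))]
    have hfold : (r.foldl (fun d c => d.modify c [] (· ++ [(((j0 : Int), r)).1.toNat])) d).getD c []
        = d.getD c [] ++ (if c ∈ r then [j0] else []) := by
      have htn : (((j0 : Int), r)).1.toNat = j0 := by simp
      rw [htn]
      have : r.foldl (fun d c => d.modify c [] (· ++ [j0])) d
          = (r.map (fun c => (c, j0))).foldl (fun d p => d.modify p.1 [] (· ++ [p.2])) d := by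
        rw [List.foldl_map]
      rw [this, PySem.Dict.getD_foldl_modify_append]
      congr 1
      rw [List.filter_map]
      have : (fun p => p.1 == c) ∘ (fun c' => (c', j0)) = (fun x => x == c) := rfl
      rw [this, List.filter_beq]
      by_cases hc : c ∈ r
      · rw [List.count_eq_one_of_mem (hnod r (List.mem_cons_self)) hc]
        simp [hc]
      · rw [List.count_eq_zero_of_not_mem hc]
        simp [hc]
    rw [hfold]
    by_cases hc : c ∈ r
    · rw [if_pos hc, if_pos hc]; simp
    · rw [if_neg hc, if_neg hc]; simp

theorem buildOcc_getD (m : List (List Int)) (d : PySem.Dict Int (List Nat)) (c : Int)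
    (hnod : ∀ r ∈ m, r.Nodup) :
    (buildOcc m d).getD c [] = d.getD c [] ++ occL m 0 c := by
  have h := buildOcc_go c m 0 d hnod
  simpa [buildOcc] using h

-- ---- pointwise characterisation of the four row-update loops
theorem passA_fst_length (rs : List (List Int)) (j0 idx : Nat) (c : Int) :
    (passA rs j0 idx c).1.length = rs.length := by
  induction rs generalizing j0 with
  | nil => simp [passA]
  | cons r rs ih =>
    by_cases h : j0 ≠ idx ∧ c ∈ r
    · simp [passA, if_pos h, ih]
    · simp [passA, if_neg h, ih]

theorem passA_fst_getElem? (rs : List (List Int)) (j0 idx : Nat) (c : Int) (k : Nat) :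
    (passA rs j0 idx c).1[k]? =
      rs[k]?.map (fun r => if j0 + k ≠ idx ∧ c ∈ r then r.erase c else r) := by
  induction rs generalizing j0 k with
  | nil => simp [passA]
  | cons r rs ih =>
    by_cases h : j0 ≠ idx ∧ c ∈ r
    · cases k with
      | zero => simp [passA, if_pos h, h]
      | succ k =>
        simp only [passA, if_pos h, List.getElem?_cons_succ]
        rw [ih (j0 + 1) k]
        have e : j0 + 1 + k = j0 + (k + 1) := by omega
        rw [e]
    · cases k with
      | zero => simp [passA, h]
      | succ k =>
        simp only [passA, if_neg h, List.getElem?_cons_succ]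
        rw [ih (j0 + 1) k]
        have e : j0 + 1 + k = j0 + (k + 1) := by omega
        rw [e]

theorem passA_snd (rs : List (List Int)) (j0 idx : Nat) (c : Int) (F : Nat → List Int)
    (hF : ∀ i (h : i < rs.length), F (j0 + i) = rs[i]) :
    (passA rs j0 idx c).2 =
      (occL rs j0 c).filter (fun j => !(j == idx) && (((F j).erase c).length == 1)) := by
  induction rs generalizing j0 with
  | nil => simp [passA, occL]
  | cons r rs ih =>
    have hF' : ∀ i (h : i < rs.length), F (j0 + 1 + i) = rs[i] := by
      intro i hi
      have e : j0 + 1 + i = j0 + (i + 1) := by omega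
      rw [e, hF (i + 1) (by simpa using Nat.succ_lt_succ hi)]
      simp
    have hF0 : F j0 = r := by simpa using hF 0 (by simp)
    by_cases hc : c ∈ r
    · by_cases hj : j0 = idx
      · have h : ¬(j0 ≠ idx ∧ c ∈ r) := by tauto
        simp only [passA, if_neg h, occL, if_pos hc, List.filter_cons]
        have : (!(j0 == idx) && (((F j0).erase c).length == 1)) = false := by
          simp [hj]
        rw [this]
        exact ih (j0 + 1) hF'
      · have h : (j0 ≠ idx ∧ c ∈ r) := ⟨hj, hc⟩
        simp only [passA, if_pos h, occL, if_pos hc, List.filter_cons]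
        have e1 : (!(j0 == idx) && (((F j0).erase c).length == 1))
            = ((r.erase c).length == 1) := by
          simp [hj, hF0]
        rw [e1, ih (j0 + 1) hF']
    · have h : ¬(j0 ≠ idx ∧ c ∈ r) := by tauto
      simp only [passA, if_neg h, occL, if_neg hc]
      exact ih (j0 + 1) hF'

theorem passD_length (rs : List (List Int)) (j0 idx : Nat) (c : Int) :
    (passD rs j0 idx c).length = rs.length := by
  induction rs generalizing j0 with
  | nil => simp [passD]
  | cons r rs ih => simp [passD, ih]

theorem passD_getElem? (rs : List (List Int)) (j0 idx : Nat) (c : Int) (k : Nat) :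
    (passD rs j0 idx c)[k]? =
      rs[k]?.map (fun r => if j0 + k ≠ idx ∧ c ∈ r then r.erase c else r) := by
  induction rs generalizing j0 k with
  | nil => simp [passD]
  | cons r rs ih =>
    cases k with
    | zero => simp [passD]
    | succ k =>
      simp only [passD, List.getElem?_cons_succ]
      rw [ih (j0 + 1) k]
      have e : j0 + 1 + k = j0 + (k + 1) := by omega
      rw [e]

theorem touchB_fst_getElem? (c : Int) (idx : Nat) (js : List Nat) (m : List (List Int))
    (acc : List Nat) (hnd : js.Nodup) (k : Nat) :
    (touchB c idx js (m, acc)).1[k]? =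
      m[k]?.map (fun r => if k ∈ js ∧ k ≠ idx then r.erase c else r) := by
  induction js generalizing m acc with
  | nil =>
    simp [touchB]
  | cons j js ih =>
    by_cases h : j = idx
    · rw [touchB_cons_pos c idx j js m acc h, ih m acc hnd.of_cons]
      cases hm : m[k]? with
      | none => rfl
      | some r =>
        simp only [Option.map_some, Option.some.injEq]
        have hiff : (k ∈ j :: js ∧ k ≠ idx) ↔ (k ∈ js ∧ k ≠ idx) := by
          simp only [List.mem_cons]
          constructor
          · rintro ⟨h1 | h1, h2⟩
            · exact absurd (h1.trans h) h2
            · exact ⟨h1, h2⟩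
          · exact fun h12 => ⟨Or.inr h12.1, h12.2⟩
        split_ifs with h1 h2 h3 <;>
          first | rfl | exact absurd (hiff.1 h1) h2 | exact absurd (hiff.2 h3) h1 |
            exact absurd (hiff.2 h1) h2 | exact absurd (hiff.1 h3) h1
    · rw [touchB_cons_neg c idx j js m acc h, ih _ _ hnd.of_cons, List.getElem?_set]
      have hjnotin : j ∉ js := (List.nodup_cons.1 hnd).1
      by_cases hjk : j = k
      · subst hjk
        by_cases hk : j < m.length
        · rw [if_pos rfl, if_pos hk]
          have hr : m[j]? = some m[j] := List.getElem?_eq_getElem hk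
          rw [hr]
          simp only [Option.map_some, Option.some.injEq]
          rw [if_neg (by tauto), if_pos ⟨List.mem_cons_self, h⟩]
          congr 1
          rw [List.getD_eq_getElem _ _ hk]
        · rw [if_pos rfl, if_neg hk]
          have hnone : m[j]? = none := List.getElem?_eq_none (by omega)
          rw [hnone]
          rfl
      · rw [if_neg hjk]
        cases hm : m[k]? with
        | none => rfl
        | some r =>
          simp only [Option.map_some, Option.some.injEq]
          have hiff : (k ∈ j :: js ∧ k ≠ idx) ↔ (k ∈ js ∧ k ≠ idx) := by
            simp only [List.mem_cons]
            constructor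
            · rintro ⟨h1 | h1, h2⟩
              · exact absurd h1.symm hjk
              · exact ⟨h1, h2⟩
            · exact fun h12 => ⟨Or.inr h12.1, h12.2⟩
          split_ifs with h1 h2 h3 <;>
            first | rfl | exact absurd (hiff.1 h1) h2 | exact absurd (hiff.2 h3) h1 |
              exact absurd (hiff.2 h1) h2 | exact absurd (hiff.1 h3) h1

theorem touchB_snd (c : Int) (idx : Nat) (js : List Nat) (m : List (List Int)) (acc : List Nat)
    (hnd : js.Nodup) :
    (touchB c idx js (m, acc)).2 =
      (js.filter (fun j => !(j == idx) && (((m.getD j []).erase c).length == 1))).reverse ++ acc := by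
  induction js generalizing m acc with
  | nil => simp [touchB]
  | cons j js ih =>
    have hjnotin : j ∉ js := (List.nodup_cons.1 hnd).1
    by_cases h : j = idx
    · rw [touchB_cons_pos c idx j js m acc h]
      simp only [List.filter_cons]
      have hb : (!(j == idx) && (((m.getD j []).erase c).length == 1)) = false := by simp [h]
      rw [hb, if_neg Bool.false_ne_true]
      exact ih m acc hnd.of_cons
    · rw [touchB_cons_neg c idx j js m acc h]
      simp only [List.filter_cons]
      rw [ih _ _ hnd.of_cons]
      have hcong : js.filter (fun j' => !(j' == idx) && ((((m.set j ((m.getD j []).erase c)).getD j' []).erase c).length == 1))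
          = js.filter (fun j' => !(j' == idx) && (((m.getD j' []).erase c).length == 1)) := by
        apply List.filter_congr
        intro x hx
        have hne : j ≠ x := fun hh => hjnotin (hh ▸ hx)
        rw [getD_set_ne hne]
      rw [hcong]
      have hb : (!(j == idx) && (((m.getD j []).erase c).length == 1))
          = (((m.getD j []).erase c).length == 1) := by simp [h]
      rw [hb]
      by_cases hl : ((m.getD j []).erase c).length = 1
      · rw [if_pos (by simpa using hl), if_pos (by simpa using hl)]
        simp
      · rw [if_neg (by simpa using hl), if_neg (by simpa using hl)]

theorem touchD_getElem? (c : Int) (idx : Nat) (js : List Nat) (m : List (List Int))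
    (hnd : js.Nodup) (k : Nat) :
    (touchD c idx js m)[k]? =
      m[k]?.map (fun r => if k ∈ js ∧ k ≠ idx then r.erase c else r) := by
  induction js generalizing m with
  | nil => simp [touchD]
  | cons j js ih =>
    have hjnotin : j ∉ js := (List.nodup_cons.1 hnd).1
    by_cases h : j = idx
    · rw [touchD_cons_pos c idx j js m h, ih m hnd.of_cons]
      cases hm : m[k]? with
      | none => rfl
      | some r =>
        simp only [Option.map_some, Option.some.injEq]
        have hiff : (k ∈ j :: js ∧ k ≠ idx) ↔ (k ∈ js ∧ k ≠ idx) := by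
          simp only [List.mem_cons]
          constructor
          · rintro ⟨h1 | h1, h2⟩
            · exact absurd (h1.trans h) h2
            · exact ⟨h1, h2⟩
          · exact fun h12 => ⟨Or.inr h12.1, h12.2⟩
        split_ifs with h1 h2 h3 <;>
          first | rfl | exact absurd (hiff.1 h1) h2 | exact absurd (hiff.2 h3) h1 |
            exact absurd (hiff.2 h1) h2 | exact absurd (hiff.1 h3) h1
    · rw [touchD_cons_neg c idx j js m h, ih _ hnd.of_cons, List.getElem?_set]
      by_cases hjk : j = k
      · subst hjk
        by_cases hk : j < m.length
        · rw [if_pos rfl, if_pos hk]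
          have hr : m[j]? = some m[j] := List.getElem?_eq_getElem hk
          rw [hr]
          simp only [Option.map_some, Option.some.injEq]
          rw [if_neg (by tauto), if_pos ⟨List.mem_cons_self, h⟩]
          congr 1
          rw [List.getD_eq_getElem _ _ hk]
        · rw [if_pos rfl, if_neg hk]
          have hnone : m[j]? = none := List.getElem?_eq_none (by omega)
          rw [hnone]
          rfl
      · rw [if_neg hjk]
        cases hm : m[k]? with
        | none => rfl
        | some r =>
          simp only [Option.map_some, Option.some.injEq]
          have hiff : (k ∈ j :: js ∧ k ≠ idx) ↔ (k ∈ js ∧ k ≠ idx) := by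
            simp only [List.mem_cons]
            constructor
            · rintro ⟨h1 | h1, h2⟩
              · exact absurd h1.symm hjk
              · exact ⟨h1, h2⟩
            · exact fun h12 => ⟨Or.inr h12.1, h12.2⟩
          split_ifs with h1 h2 h3 <;>
            first | rfl | exact absurd (hiff.1 h1) h2 | exact absurd (hiff.2 h3) h1 |
              exact absurd (hiff.2 h1) h2 | exact absurd (hiff.1 h3) h1

-- ---- the two passes agree
theorem pass_eq_fst (m : List (List Int)) (idx : Nat) (c : Int) :
    (touchB c idx (occL m 0 c) (m, [])).1 = (passA m 0 idx c).1 := by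
  apply List.ext_getElem?
  intro k
  rw [touchB_fst_getElem? _ _ _ _ _ (occL_nodup _ _ _), passA_fst_getElem?]
  cases hm : m[k]? with
  | none => rfl
  | some r =>
    have hk : k < m.length := by
      by_contra hk
      rw [List.getElem?_eq_none (by omega)] at hm
      simp at hm
    have hgd : m.getD k [] = r := by
      rw [List.getD_eq_getElem _ _ hk]
      simpa [List.getElem?_eq_getElem hk] using hm
    simp only [Option.map_some, Option.some.injEq]
    have hiff : (k ∈ occL m 0 c ∧ k ≠ idx) ↔ (0 + k ≠ idx ∧ c ∈ r) := by
      rw [occL_mem_zero, hgd]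
      constructor
      · rintro ⟨⟨_, h2⟩, h3⟩; exact ⟨by omega, h2⟩
      · rintro ⟨h1, h2⟩; exact ⟨⟨hk, h2⟩, by omega⟩
    split_ifs with h1 h2 h3 <;>
      first | rfl | exact absurd (hiff.1 h1) h2 | exact absurd (hiff.2 h3) h1 |
        exact absurd (hiff.2 h1) h2 | exact absurd (hiff.1 h3) h1

theorem pass_eq_snd (m : List (List Int)) (idx : Nat) (c : Int) :
    (touchB c idx (occL m 0 c) (m, [])).2 = (passA m 0 idx c).2.reverse := by
  rw [touchB_snd _ _ _ _ _ (occL_nodup _ _ _),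
    passA_snd m 0 idx c (fun j => m.getD j [])
      (fun i hi => by simp only [Nat.zero_add]; exact List.getD_eq_getElem _ _ hi)]
  simp

theorem passD_eq (m : List (List Int)) (idx : Nat) (c : Int) :
    touchD c idx (occL m 0 c) m = passD m 0 idx c := by
  apply List.ext_getElem?
  intro k
  rw [touchD_getElem? _ _ _ _ (occL_nodup _ _ _), passD_getElem?]
  cases hm : m[k]? with
  | none => rfl
  | some r =>
    have hk : k < m.length := by
      by_contra hk
      rw [List.getElem?_eq_none (by omega)] at hm
      simp at hm
    have hgd : m.getD k [] = r := by
      rw [List.getD_eq_getElem _ _ hk]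
      simpa [List.getElem?_eq_getElem hk] using hm
    simp only [Option.map_some, Option.some.injEq]
    have hiff : (k ∈ occL m 0 c ∧ k ≠ idx) ↔ (0 + k ≠ idx ∧ c ∈ r) := by
      rw [occL_mem_zero, hgd]
      constructor
      · rintro ⟨⟨_, h2⟩, h3⟩; exact ⟨by omega, h2⟩
      · rintro ⟨h1, h2⟩; exact ⟨⟨hk, h2⟩, by omega⟩
    split_ifs with h1 h2 h3 <;>
      first | rfl | exact absurd (hiff.1 h1) h2 | exact absurd (hiff.2 h3) h1 |
        exact absurd (hiff.2 h1) h2 | exact absurd (hiff.1 h3) h1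

-- ---- active-column bookkeeping: erase-from-active = record-in-removed
def actOf (rem : PySem.Set Int) (n : Nat) : List Int :=
  (PySem.List.pyRange 0 (n : Int) 1).filter (fun x => !(PySem.Set.contains rem x))

theorem actOf_nodup (rem : PySem.Set Int) (n : Nat) : (actOf rem n).Nodup :=
  (PySem.List.nodup_pyRange_one _ _).filter _

theorem actOf_pairwise (rem : PySem.Set Int) (n : Nat) : (actOf rem n).Pairwise (· < ·) :=
  (PySem.List.pairwise_lt_pyRange_one _ _).filter _

theorem actOf_erase (rem : PySem.Set Int) (n : Nat) (c : Int) :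
    (actOf rem n).erase c = actOf (PySem.Set.add rem c) n := by
  rw [(actOf_nodup rem n).erase_eq_filter c]
  unfold actOf
  rw [List.filter_filter]
  apply List.filter_congr
  intro x hx
  have hadd : (PySem.Set.contains (PySem.Set.add rem c) x = true) ↔ (x ∈ rem ∨ x = c) := by
    rw [PySem.Set.contains_iff, PySem.Set.mem_add]
  have hrem : (PySem.Set.contains rem x = true) ↔ x ∈ rem := PySem.Set.contains_iff rem x
  by_cases h1 : x ∈ rem <;> by_cases h2 : x = c <;>
    simp_all [hadd, hrem]

theorem actOf_empty (n : Nat) : actOf PySem.Set.empty n = PySem.List.pyRange 0 (n : Int) 1 := by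
  unfold actOf
  apply List.filter_eq_self.2
  intro x _
  have : ¬ (PySem.Set.contains PySem.Set.empty x = true) := by
    rw [PySem.Set.contains_iff]
    simp [PySem.Set.empty]
  simp only [Bool.not_eq_true] at this
  simp [this]

-- ---- the state reached after one cascade event
theorem passA_getD (m : List (List Int)) (idx : Nat) (c : Int) (k : Nat) :
    (passA m 0 idx c).1.getD k [] =
      if k ≠ idx ∧ c ∈ m.getD k [] then (m.getD k []).erase c else m.getD k [] := by
  by_cases hk : k < m.length
  · rw [List.getD_eq_getElem?_getD, passA_fst_getElem?, List.getElem?_eq_getElem hk]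
    simp only [Option.map_some, Option.getD_some, Nat.zero_add]
    rw [List.getD_eq_getElem _ _ hk]
  · have h1 : (passA m 0 idx c).1[k]? = none := by
      rw [passA_fst_getElem?, List.getElem?_eq_none (by omega)]; rfl
    rw [List.getD_eq_getElem?_getD, h1, getD_of_le (by omega)]
    simp

theorem passD_getD (m : List (List Int)) (idx : Nat) (c : Int) (k : Nat) :
    (passD m 0 idx c).getD k [] =
      if k ≠ idx ∧ c ∈ m.getD k [] then (m.getD k []).erase c else m.getD k [] := by
  by_cases hk : k < m.length
  · rw [List.getD_eq_getElem?_getD, passD_getElem?, List.getElem?_eq_getElem hk]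
    simp only [Option.map_some, Option.getD_some, Nat.zero_add]
    rw [List.getD_eq_getElem _ _ hk]
  · have h1 : (passD m 0 idx c)[k]? = none := by
      rw [passD_getElem?, List.getElem?_eq_none (by omega)]; rfl
    rw [List.getD_eq_getElem?_getD, h1, getD_of_le (by omega)]
    simp

theorem nodup_of_getD {m : List (List Int)}
    (h : ∀ k, (m.getD k []).Nodup) : ∀ r ∈ m, r.Nodup := by
  intro r hr
  obtain ⟨k, hk, rfl⟩ := List.mem_iff_getElem.1 hr
  have := h k
  rwa [List.getD_eq_getElem _ _ hk] at this

theorem getD_nodup {m : List (List Int)} (hnod : ∀ r ∈ m, r.Nodup) (k : Nat) :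
    (m.getD k []).Nodup := by
  by_cases hk : k < m.length
  · exact hnod _ (getD_mem hk)
  · rw [getD_of_le (by omega)]; exact List.nodup_nil

theorem nodup_afterPass {m : List (List Int)} (idx : Nat) (c : Int)
    (hnod : ∀ r ∈ m, r.Nodup) : ∀ r ∈ (passA m 0 idx c).1.set idx [], r.Nodup := by
  apply nodup_of_getD
  intro k
  by_cases hki : idx = k
  · rw [← hki, getD_set_nil_self]; exact List.nodup_nil
  · rw [getD_set_ne hki, passA_getD]
    split_ifs
    · exact (getD_nodup hnod k).erase c
    · exact getD_nodup hnod k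

theorem afterPass_getD {m : List (List Int)} (idx : Nat) (c : Int)
    (k : Nat) (hidx : idx < m.length) :
    ((passA m 0 idx c).1.set idx []).getD k [] =
      if k = idx then [] else
        if c ∈ m.getD k [] then (m.getD k []).erase c else m.getD k [] := by
  by_cases hki : k = idx
  · subst hki
    rw [getD_set_self (by rw [passA_fst_length]; exact hidx), if_pos rfl]
  · rw [getD_set_ne (fun h => hki h.symm), passA_getD, if_neg hki]
    rw [if_congr (by tauto : (k ≠ idx ∧ c ∈ m.getD k []) ↔ c ∈ m.getD k []) rfl rfl]

theorem occ_step (m : List (List Int)) (idx : Nat) (coeff : Int)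
    (occ : PySem.Dict Int (List Nat)) (hnod : ∀ r ∈ m, r.Nodup)
    (hocc : ∀ c, occ.getD c [] = occL m 0 c)
    (hidx : idx < m.length) (hrow : m.getD idx [] = [coeff]) :
    ∀ c, (occ.insert coeff []).getD c [] =
      occL ((passA m 0 idx coeff).1.set idx []) 0 c := by
  intro c
  rw [PySem.Dict.getD_insert]
  by_cases hc : c = coeff
  · subst hc
    rw [if_pos rfl]
    symm
    apply occL_eq_nil
    intro k
    rw [afterPass_getD idx c k hidx]
    split_ifs with h1 h2
    · simp
    · exact (getD_nodup hnod k).not_mem_erase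
    · exact h2
  · rw [if_neg hc, hocc c]
    symm
    apply occL_congr
    · rw [List.length_set, passA_fst_length]
    · intro k
      rw [afterPass_getD idx coeff k hidx]
      by_cases hki : k = idx
      · subst hki
        rw [if_pos rfl, hrow]
        simp [hc]
      · rw [if_neg hki]
        split_ifs with h2
        · exact List.mem_erase_of_ne hc
        · exact Iff.rfl

-- ===== cascade equivalence =====
theorem cascade_eq (n : Nat) :
    ∀ (fuel : Nat) (q : List Nat) (st : CasSt),
      (∀ r ∈ st.mat, r.Nodup) → (∀ c, st.occ.getD c [] = occL st.mat 0 c) →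
      cascadeA fuel st.mat q (actOf st.rem n) =
        ((cascadeB fuel q st).1, actOf (cascadeB fuel q st).2 n) := by
  intro fuel
  induction fuel with
  | zero => intro q st _ _; rfl
  | succ f ih =>
    intro q st hnod hocc
    cases q with
    | nil => rfl
    | cons index rest =>
      simp only [cascadeA, cascadeB]
      by_cases hlen : (st.mat.getD index []).length ≠ 1
      · rw [if_pos hlen, if_pos hlen]
        exact ih rest st hnod hocc
      · rw [if_neg hlen, if_neg hlen]
        push_neg at hlen
        have hidx : index < st.mat.length := by
          by_contra hi
          rw [getD_of_le (by omega)] at hlen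
          simp at hlen
        have hrow : st.mat.getD index [] = [(st.mat.getD index []).headD 0] :=
          eq_singleton_of_length_one hlen
        rw [hocc ((st.mat.getD index []).headD 0)]
        rw [pass_eq_fst st.mat index ((st.mat.getD index []).headD 0),
          pass_eq_snd st.mat index ((st.mat.getD index []).headD 0)]
        rw [actOf_erase]
        exact ih _ ⟨((passA st.mat 0 index ((st.mat.getD index []).headD 0)).1.set index []),
            st.occ.insert ((st.mat.getD index []).headD 0) [],
            PySem.Set.add st.rem ((st.mat.getD index []).headD 0)⟩
          (nodup_afterPass index _ hnod)
          (occ_step st.mat index _ st.occ hnod hocc hidx hrow)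

theorem cascadeA_nodup : ∀ (fuel : Nat) (m : List (List Int)) (q : List Nat) (act : List Int),
    (∀ r ∈ m, r.Nodup) → ∀ r ∈ (cascadeA fuel m q act).1, r.Nodup := by
  intro fuel
  induction fuel with
  | zero => intro m q act h; exact h
  | succ f ih =>
    intro m q act h
    cases q with
    | nil => exact h
    | cons index rest =>
      simp only [cascadeA]
      by_cases hlen : (m.getD index []).length ≠ 1
      · rw [if_pos hlen]; exact ih m rest act h
      · rw [if_neg hlen]
        exact ih _ _ _ (nodup_afterPass index _ h)

-- ===== phase-2 helpers =====
theorem nodup_passD {m : List (List Int)} (idx : Nat) (c : Int)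
    (hnod : ∀ r ∈ m, r.Nodup) : ∀ r ∈ passD m 0 idx c, r.Nodup := by
  apply nodup_of_getD
  intro k
  rw [passD_getD]
  split_ifs
  · exact (getD_nodup hnod k).erase c
  · exact getD_nodup hnod k

theorem foldTD_eq (i : Nat) (occ : PySem.Dict Int (List Nat)) :
    ∀ (cs : List Int) (m : List (List Int)), cs.Nodup → (∀ r ∈ m, r.Nodup) →
      (∀ c ∈ cs, occ.getD c [] = occL m 0 c) →
      cs.foldl (fun mm c => touchD c i (occ.getD c []) mm) m
        = cs.foldl (fun mm c => passD mm 0 i c) m := by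
  intro cs
  induction cs with
  | nil => intro m _ _ _; rfl
  | cons c cs ih =>
    intro m hcs hnod hocc
    simp only [List.foldl_cons]
    rw [hocc c List.mem_cons_self, passD_eq]
    apply ih _ (List.nodup_cons.1 hcs).2 (nodup_passD i c hnod)
    intro c' hc'
    rw [hocc c' (List.mem_cons_of_mem _ hc')]
    symm
    apply occL_congr
    · exact passD_length m 0 i c
    · intro k
      have hcc : c' ≠ c := fun h => (List.nodup_cons.1 hcs).1 (h ▸ hc')
      rw [passD_getD]
      split_ifs with h1
      · exact List.mem_erase_of_ne hcc
      · exact Iff.rfl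

theorem foldPassD_length (i : Nat) (cs : List Int) (m : List (List Int)) :
    (cs.foldl (fun mm c => passD mm 0 i c) m).length = m.length := by
  induction cs generalizing m with
  | nil => rfl
  | cons c cs ih => simp [List.foldl_cons, ih, passD_length]

theorem foldPassD_nodup (i : Nat) (cs : List Int) (m : List (List Int))
    (hnod : ∀ r ∈ m, r.Nodup) :
    ∀ r ∈ cs.foldl (fun mm c => passD mm 0 i c) m, r.Nodup := by
  induction cs generalizing m with
  | nil => exact hnod
  | cons c cs ih => exact ih _ (nodup_passD i c hnod)

theorem foldPassD_getD_mem (i : Nat) :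
    ∀ (cs : List Int) (m : List (List Int)), (∀ r ∈ m, r.Nodup) → ∀ (c : Int) (k : Nat),
      (c ∈ (cs.foldl (fun mm c' => passD mm 0 i c') m).getD k [] ↔
        c ∈ m.getD k [] ∧ ¬(c ∈ cs ∧ k ≠ i)) := by
  intro cs
  induction cs with
  | nil => intro m _ c k; simp
  | cons c0 cs ih =>
    intro m hnod c k
    simp only [List.foldl_cons]
    rw [ih (passD m 0 i c0) (nodup_passD i c0 hnod) c k]
    have hstep : c ∈ (passD m 0 i c0).getD k [] ↔ c ∈ m.getD k [] ∧ ¬(c = c0 ∧ k ≠ i) := by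
      rw [passD_getD]
      split_ifs with h1
      · rw [(getD_nodup hnod k).mem_erase_iff]
        constructor
        · rintro ⟨hne, hmem⟩; exact ⟨hmem, by tauto⟩
        · rintro ⟨hmem, hno⟩
          refine ⟨?_, hmem⟩
          intro he
          exact hno ⟨he, h1.1⟩
      · constructor
        · intro hmem
          refine ⟨hmem, ?_⟩
          rintro ⟨rfl, hki⟩
          exact h1 ⟨hki, hmem⟩
        · exact fun h => h.1
    rw [hstep]
    simp only [List.mem_cons]
    tauto

theorem foldInsertNil_getD (cs : List Int) (occ : PySem.Dict Int (List Nat)) (x : Int) :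
    (cs.foldl (fun d c => d.insert c []) occ).getD x [] =
      if x ∈ cs then [] else occ.getD x [] := by
  induction cs generalizing occ with
  | nil => simp
  | cons c cs ih =>
    simp only [List.foldl_cons]
    rw [ih]
    by_cases hx : x ∈ cs
    · rw [if_pos hx, if_pos (List.mem_cons_of_mem _ hx)]
    · rw [if_neg hx, PySem.Dict.getD_insert]
      by_cases hxc : x = c
      · rw [if_pos hxc, if_pos (by simp [hxc])]
      · rw [if_neg hxc, if_neg (by simp [hxc, hx])]

theorem foldErase_act (n : Nat) (cs : List Int) :
    ∀ rem : PySem.Set Int,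
      cs.foldl (fun a c => a.erase c) (actOf rem n) = actOf (cs.foldl PySem.Set.add rem) n := by
  induction cs with
  | nil => intro rem; rfl
  | cons c cs ih =>
    intro rem
    simp only [List.foldl_cons]
    rw [actOf_erase, ih]

-- elimA against elimB
theorem elimA_fold (cs : List Int) (i : Nat) (m : List (List Int)) (act : List Int) :
    cs.foldl (fun (st : List (List Int) × List Int) coeff =>
        (passD st.1 0 i coeff, st.2.erase coeff)) (m, act)
      = (cs.foldl (fun mm c => passD mm 0 i c) m, cs.foldl (fun a c => a.erase c) act) := by
  induction cs generalizing m act with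
  | nil => rfl
  | cons c cs ih => simp only [List.foldl_cons]; rw [ih]

theorem elimB_fold (cs : List Int) (i : Nat) (occ : PySem.Dict Int (List Nat))
    (m : List (List Int)) (rem : PySem.Set Int) :
    cs.foldl (fun (st : List (List Int) × PySem.Set Int) coeff =>
        (touchD coeff i (occ.getD coeff []) st.1, PySem.Set.add st.2 coeff)) (m, rem)
      = (cs.foldl (fun mm c => touchD c i (occ.getD c []) mm) m, cs.foldl PySem.Set.add rem) := by
  induction cs generalizing m rem with
  | nil => rfl
  | cons c cs ih => simp only [List.foldl_cons]; rw [ih]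

theorem elimA_split (m : List (List Int)) (act : List Int) (i : Nat) :
    elimA m act i = ((m.getD i []).foldl (fun mm c => passD mm 0 i c) m,
      (m.getD i []).foldl (fun a c => a.erase c) act) := by
  unfold elimA
  rw [elimA_fold]

theorem elimB_split (m : List (List Int)) (occ : PySem.Dict Int (List Nat))
    (rem : PySem.Set Int) (i : Nat) :
    elimB m occ rem i =
      (((m.getD i []).foldl (fun mm c => touchD c i (occ.getD c []) mm) m).set i [],
        (m.getD i []).foldl (fun d c => d.insert c []) occ,
        (m.getD i []).foldl PySem.Set.add rem) := by
  simp only [elimB]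
  rw [elimB_fold]

theorem elim_eq (n : Nat) (m : List (List Int)) (occ : PySem.Dict Int (List Nat))
    (rem : PySem.Set Int) (i : Nat)
    (hnod : ∀ r ∈ m, r.Nodup) (hocc : ∀ c, occ.getD c [] = occL m 0 c) :
    (elimA m (actOf rem n) i).1.set i [] = (elimB m occ rem i).1 ∧
      (elimA m (actOf rem n) i).2 = actOf (elimB m occ rem i).2.2 n := by
  rw [elimB_split, elimA_split]
  constructor
  · simp only
    rw [foldTD_eq i occ _ m (getD_nodup hnod i) hnod (fun c _ => hocc c)]
  · simp only
    rw [foldErase_act]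

theorem elim_occ (m : List (List Int)) (occ : PySem.Dict Int (List Nat))
    (rem : PySem.Set Int) (i : Nat)
    (hnod : ∀ r ∈ m, r.Nodup) (hocc : ∀ c, occ.getD c [] = occL m 0 c) :
    ∀ c, (elimB m occ rem i).2.1.getD c [] = occL (elimB m occ rem i).1 0 c := by
  intro c
  rw [elimB_split]
  simp only
  rw [foldTD_eq i occ _ m (getD_nodup hnod i) hnod (fun c _ => hocc c)]
  rw [foldInsertNil_getD]
  by_cases hc : c ∈ m.getD i []
  · rw [if_pos hc]
    symm
    apply occL_eq_nil
    intro k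
    by_cases hki : k = i
    · rw [hki, getD_set_nil_self]
      simp
    · rw [getD_set_ne (fun h => hki h.symm)]
      rw [foldPassD_getD_mem i _ m hnod c k]
      rintro ⟨_, hno⟩
      exact hno ⟨hc, hki⟩
  · rw [if_neg hc, hocc c]
    symm
    apply occL_congr
    · rw [List.length_set, foldPassD_length]
    · intro k
      by_cases hki : k = i
      · rw [hki, getD_set_nil_self]
        exact iff_of_false (by simp) (hki ▸ hc)
      · rw [getD_set_ne (fun h => hki h.symm)]
        rw [foldPassD_getD_mem i _ m hnod c k]
        constructor
        · exact fun h => h.1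
        · intro h
          exact ⟨h, fun hh => hc hh.1⟩

theorem elimB_nodup (m : List (List Int)) (occ : PySem.Dict Int (List Nat))
    (rem : PySem.Set Int) (i : Nat)
    (hnod : ∀ r ∈ m, r.Nodup) (hocc : ∀ c, occ.getD c [] = occL m 0 c) :
    ∀ r ∈ (elimB m occ rem i).1, r.Nodup := by
  rw [elimB_split]
  simp only
  rw [foldTD_eq i occ _ m (getD_nodup hnod i) hnod (fun c _ => hocc c)]
  apply nodup_of_getD
  intro k
  by_cases hki : k = i
  · rw [hki, getD_set_nil_self]; exact List.nodup_nil
  · rw [getD_set_ne (fun h => hki h.symm)]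
    exact getD_nodup (foldPassD_nodup i _ m hnod) k

-- ===== enumerate-based helpers agree with A's index recursions =====
theorem enumSingles_go (m : List (List Int)) : ∀ s : Nat,
    (PySem.List.enumerate m (s : Int)).filterMap
        (fun p => if p.2.length == 1 then some p.1.toNat else none) = sglIdx m s := by
  induction m with
  | nil => intro s; simp [PySem.List.enumerate_nil, sglIdx]
  | cons r rs ih =>
    intro s
    rw [PySem.List.enumerate_cons]
    have hs1 : ((s : Int) + 1) = ((s + 1 : Nat) : Int) := by push_cast; ring
    simp only [List.filterMap_cons, sglIdx, hs1, ih (s + 1)]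
    by_cases h : r.length = 1
    · simp [h]
    · simp [h]

theorem enumSingles_eq (m : List (List Int)) : enumSingles m = sglIdx m 0 := by
  have := enumSingles_go m 0
  simpa [enumSingles] using this

theorem findB_go (L : Int) (m : List (List Int)) : ∀ s : Nat,
    ((PySem.List.enumerate m (s : Int)).find? (fun p => (p.2.length : Int) == L)).map
        (fun p => p.1.toNat) =
      (m.findIdx? (fun row => (row.length : Int) == L)).map (fun i => i + s) := by
  induction m with
  | nil => intro s; simp [PySem.List.enumerate_nil]
  | cons r rs ih =>
    intro s
    rw [PySem.List.enumerate_cons]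
    by_cases h : ((r.length : Int) == L) = true
    · rw [List.find?_cons_of_pos (p := fun p => (p.2.length : Int) == L)
        (a := ((s : Int), r)) (l := PySem.List.enumerate rs ((s : Int) + 1)) h,
        List.findIdx?_cons, if_pos h]
      simp
    · rw [List.find?_cons_of_neg (p := fun p => (p.2.length : Int) == L)
        (a := ((s : Int), r)) (l := PySem.List.enumerate rs ((s : Int) + 1)) h,
        List.findIdx?_cons, if_neg h]
      have hs1 : ((s : Int) + 1) = ((s + 1 : Nat) : Int) := by push_cast; ring
      rw [hs1, ih (s + 1)]
      cases rs.findIdx? (fun row => (row.length : Int) == L) with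
      | none => rfl
      | some i =>
        simp only [Option.map_some, Option.some.injEq]
        omega

theorem findB_eq (m : List (List Int)) (L : Int) :
    findB m L = m.findIdx? (fun row => (row.length : Int) == L) := by
  have := findB_go L m 0
  simp only [Nat.cast_zero] at this
  rw [findB, this]
  cases m.findIdx? (fun row => (row.length : Int) == L) <;> simp

-- ===== nested phase-2 loop = A's flat loop =====
theorem p2Inner_spec (n : Nat) : ∀ (f : Nat) (st : P2St) (L : Int),
    (∀ r ∈ st.mat, r.Nodup) → (∀ c, st.occ.getD c [] = occL st.mat 0 c) →
    (∀ r ∈ (p2InnerB f st L).2.1.mat, r.Nodup) ∧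
    (∀ c, (p2InnerB f st L).2.1.occ.getD c [] = occL (p2InnerB f st L).2.1.mat 0 c) ∧
    ((p2InnerB f st L).2.2 = true → (p2InnerB f st L).1 < f) ∧
    phase2A f st.mat (actOf st.rem n) st.td L st.flag =
      (if (p2InnerB f st L).2.2 then
        phase2A (p2InnerB f st L).1 (p2InnerB f st L).2.1.mat
          (actOf (p2InnerB f st L).2.1.rem n) (p2InnerB f st L).2.1.td (L + 1)
          (p2InnerB f st L).2.1.flag
      else ((p2InnerB f st L).2.1.mat, actOf (p2InnerB f st L).2.1.rem n,
        (p2InnerB f st L).2.1.flag)) := by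
  intro f
  induction f with
  | zero =>
    intro st L hnod hocc
    refine ⟨hnod, hocc, by simp [p2InnerB], ?_⟩
    simp [p2InnerB, phase2A]
  | succ f ih =>
    intro st L hnod hocc
    by_cases hg : st.td ≥ L - 1
    · cases hfind : st.mat.findIdx? (fun row => (row.length : Int) == L) with
      | none =>
        have hstep : p2InnerB (f + 1) st L = (f, st, true) := by
          simp only [p2InnerB]
          rw [if_pos hg, findB_eq, hfind]
        rw [hstep]
        refine ⟨hnod, hocc, fun _ => Nat.lt_succ_self f, ?_⟩
        have hflat : phase2A (f + 1) st.mat (actOf st.rem n) st.td L st.flag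
            = phase2A f st.mat (actOf st.rem n) st.td (L + 1) st.flag := by
          simp only [phase2A]
          rw [if_pos hg, hfind]
        rw [hflat]
        simp
      | some i =>
        have hstep : p2InnerB (f + 1) st L =
            p2InnerB f ⟨(elimB st.mat st.occ st.rem i).1, (elimB st.mat st.occ st.rem i).2.1,
              (elimB st.mat st.occ st.rem i).2.2, st.td - (L - 1), true⟩ L := by
          simp only [p2InnerB]
          rw [if_pos hg, findB_eq, hfind]
        obtain ⟨h1, h2⟩ := elim_eq n st.mat st.occ st.rem i hnod hocc
        have ihh := ih ⟨(elimB st.mat st.occ st.rem i).1, (elimB st.mat st.occ st.rem i).2.1,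
            (elimB st.mat st.occ st.rem i).2.2, st.td - (L - 1), true⟩ L
          (elimB_nodup st.mat st.occ st.rem i hnod hocc)
          (elim_occ st.mat st.occ st.rem i hnod hocc)
        rw [hstep]
        refine ⟨ihh.1, ihh.2.1, fun hc => Nat.lt_succ_of_lt (ihh.2.2.1 hc), ?_⟩
        have hflat : phase2A (f + 1) st.mat (actOf st.rem n) st.td L st.flag =
            phase2A f (elimB st.mat st.occ st.rem i).1
              (actOf (elimB st.mat st.occ st.rem i).2.2 n) (st.td - (L - 1)) L true := by
          simp only [phase2A]
          rw [if_pos hg, hfind, ← h1, ← h2]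
        rw [hflat]
        exact ihh.2.2.2
    · have hstep : p2InnerB (f + 1) st L = (f + 1, st, false) := by
        simp only [p2InnerB]
        rw [if_neg hg]
      rw [hstep]
      refine ⟨hnod, hocc, by simp, ?_⟩
      have hflat : phase2A (f + 1) st.mat (actOf st.rem n) st.td L st.flag
          = (st.mat, actOf st.rem n, st.flag) := by
        simp only [phase2A]
        rw [if_neg hg]
      rw [hflat]
      simp

theorem p2Outer_spec (n : Nat) : ∀ (fo f : Nat) (st : P2St) (L : Int), f < fo →
    (∀ r ∈ st.mat, r.Nodup) → (∀ c, st.occ.getD c [] = occL st.mat 0 c) →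
    (∀ r ∈ (p2OuterB fo f st L).mat, r.Nodup) ∧
    phase2A f st.mat (actOf st.rem n) st.td L st.flag =
      ((p2OuterB fo f st L).mat, actOf (p2OuterB fo f st L).rem n, (p2OuterB fo f st L).flag) := by
  intro fo
  induction fo with
  | zero => intro f st L hf; omega
  | succ fo ih =>
    intro f st L hf hnod hocc
    obtain ⟨hn1, ho1, hlt, hflat⟩ := p2Inner_spec n f st L hnod hocc
    by_cases hc : (p2InnerB f st L).2.2 = true
    · have hout : p2OuterB (fo + 1) f st L =
          p2OuterB fo (p2InnerB f st L).1 (p2InnerB f st L).2.1 (L + 1) := by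
        simp [p2OuterB, hc]
      rw [hout]
      have := ih (p2InnerB f st L).1 (p2InnerB f st L).2.1 (L + 1)
        (by have := hlt hc; omega) hn1 ho1
      refine ⟨this.1, ?_⟩
      rw [hflat, if_pos hc]
      exact this.2
    · have hout : p2OuterB (fo + 1) f st L = (p2InnerB f st L).2.1 := by
        simp [p2OuterB, hc]
      rw [hout]
      refine ⟨hn1, ?_⟩
      rw [hflat, if_neg hc]

-- ===== compress = A's sorted/active-column compaction =====
def posIn : List Int → Int → Option Int
  | [], _ => none
  | a :: t, x => if a = x then some 0 else (posIn t x).map (· + 1)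

theorem posIn_eq_none (l : List Int) (x : Int) (h : x ∉ l) : posIn l x = none := by
  induction l with
  | nil => rfl
  | cons a t ih =>
    simp only [List.mem_cons, not_or] at h
    simp [posIn, Ne.symm h.1, ih h.2]

theorem posIn_getD (l : List Int) (hnd : l.Nodup) (r : Nat) (hr : r < l.length) :
    posIn l (l.getD r 0) = some (r : Int) := by
  induction l generalizing r with
  | nil => simp at hr
  | cons a t ih =>
    cases r with
    | zero => simp [posIn]
    | succ r =>
      have hmem : t.getD r 0 ∈ t := by
        rw [List.getD_eq_getElem _ _ (by simpa using Nat.lt_of_succ_lt_succ hr)]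
        exact List.getElem_mem _
      have hne : a ≠ t.getD r 0 := fun h => (List.nodup_cons.1 hnd).1 (h ▸ hmem)
      simp only [List.getD_cons_succ, posIn, if_neg hne,
        ih (List.nodup_cons.1 hnd).2 r (by simpa using Nat.lt_of_succ_lt_succ hr)]
      simp only [Option.map_some, Option.some.injEq]
      push_cast
      ring

theorem posIn_some (l : List Int) (x v : Int) (h : posIn l x = some v) :
    ∃ r : Nat, r < l.length ∧ l.getD r 0 = x ∧ v = (r : Int) := by
  induction l generalizing v with
  | nil => simp [posIn] at h
  | cons a t ih =>
    simp only [posIn] at h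
    by_cases hax : a = x
    · rw [if_pos hax] at h
      exact ⟨0, by simp, by simpa using hax, by simpa using h.symm⟩
    · rw [if_neg hax] at h
      cases hp : posIn t x with
      | none => rw [hp] at h; simp at h
      | some w =>
        rw [hp] at h
        simp only [Option.map_some, Option.some.injEq] at h
        obtain ⟨r, hr, hg, hv⟩ := ih w hp
        exact ⟨r + 1, by simpa using Nat.succ_lt_succ hr, by simpa using hg,
          by rw [← h, hv]; push_cast; ring⟩

theorem rankFold_go (pairs : List (Int × Int)) (rem : PySem.Set Int) :
    ∀ (cs : List Int) (d : PySem.Dict Int Int) (ps : List (Int × Int)), cs.Nodup →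
      (cs.foldl (fun st c =>
          if PySem.Set.contains rem c then st
          else (st.1.insert c (st.2.length : Int), st.2 ++ [pairs.getD c.toNat (0, 0)]))
        (d, ps)).2
        = ps ++ (cs.filter (fun x => !(PySem.Set.contains rem x))).map
            (fun c => pairs.getD c.toNat (0, 0)) ∧
      ∀ x, (cs.foldl (fun st c =>
          if PySem.Set.contains rem c then st
          else (st.1.insert c (st.2.length : Int), st.2 ++ [pairs.getD c.toNat (0, 0)]))
        (d, ps)).1.get? x =
        match posIn (cs.filter (fun x => !(PySem.Set.contains rem x))) x with
        | some k => some ((ps.length : Int) + k)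
        | none => d.get? x := by
  intro cs
  induction cs with
  | nil => intro d ps _; exact ⟨by simp, fun x => by simp [posIn]⟩
  | cons c cs ih =>
    intro d ps hnd
    by_cases hk : PySem.Set.contains rem c = true
    · have hfil : (c :: cs).filter (fun x => !(PySem.Set.contains rem x))
          = cs.filter (fun x => !(PySem.Set.contains rem x)) := by
        simp [List.filter_cons, (PySem.Set.contains_iff rem c).1 hk]
      simp only [List.foldl_cons, if_pos hk, hfil]
      exact ih d ps hnd.of_cons
    · have hfil : (c :: cs).filter (fun x => !(PySem.Set.contains rem x))
          = c :: cs.filter (fun x => !(PySem.Set.contains rem x)) := by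
        have hnm : c ∉ rem := fun h => hk ((PySem.Set.contains_iff rem c).2 h)
        simp [List.filter_cons, hnm]
      simp only [List.foldl_cons, if_neg hk, hfil]
      obtain ⟨ih1, ih2⟩ := ih (d.insert c (ps.length : Int)) (ps ++ [pairs.getD c.toNat (0, 0)])
        hnd.of_cons
      constructor
      · rw [ih1]; simp
      · intro x
        rw [ih2 x]
        have hcnotin : c ∉ cs.filter (fun x => !(PySem.Set.contains rem x)) :=
          fun h => (List.nodup_cons.1 hnd).1 (List.mem_of_mem_filter h)
        by_cases hcx : c = x
        · subst hcx
          rw [posIn_eq_none _ _ hcnotin]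
          simp only [posIn, if_pos rfl]
          rw [PySem.Dict.get?_insert_self]
          simp
        · simp only [posIn, if_neg hcx]
          cases hp : posIn (cs.filter (fun x => !(PySem.Set.contains rem x))) x with
          | none =>
            simp only [Option.map_none]
            rw [PySem.Dict.get?_insert_of_ne _ _ (fun h => hcx h.symm)]
          | some w =>
            simp only [Option.map_some, List.length_append, List.length_cons,
              List.length_nil]
            congr 1
            push_cast
            ring

-- membership/order characterisation of remapRow
theorem remapRow_mem (act row : List Int) (v : Int) :
    v ∈ remapRow act row ↔ ∃ r : Nat, r < act.length ∧ act.getD r 0 ∈ row ∧ v = (r : Int) := by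
  unfold remapRow
  simp only [List.mem_filterMap, List.mem_range]
  constructor
  · rintro ⟨r, hr, hv⟩
    by_cases hm : act.getD r 0 ∈ row
    · rw [if_pos hm] at hv
      exact ⟨r, hr, hm, by simpa using hv.symm⟩
    · rw [if_neg hm] at hv; simp at hv
  · rintro ⟨r, hr, hm, rfl⟩
    exact ⟨r, hr, by rw [if_pos hm]⟩

theorem remapRow_pairwise (act row : List Int) : (remapRow act row).Pairwise (· < ·) := by
  unfold remapRow
  apply List.Pairwise.filterMap (R := (· < ·))
  · intro a b hab x hx y hy
    by_cases ha : act.getD a 0 ∈ row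
    · rw [if_pos ha] at hx
      by_cases hb : act.getD b 0 ∈ row
      · rw [if_pos hb] at hy
        simp only [Option.mem_def, Option.some.injEq] at hx hy
        subst hx; subst hy
        exact_mod_cast hab
      · rw [if_neg hb] at hy; simp at hy
    · rw [if_neg ha] at hx; simp at hx
  · exact List.pairwise_lt_range

theorem sortedRemap_eq (act row : List Int) (hact : act.Nodup) (hrow : row.Nodup)
    (g : Int → Option Int) (hg : ∀ x, g x = posIn act x) :
    PySem.List.sorted (row.filterMap g) (fun x => x) = remapRow act row := by
  apply PySem.List.sorted_eq_of_perm_of_pairwise_lt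
  · apply (List.perm_ext_iff_of_nodup ?_ ?_).2
    · intro v
      rw [remapRow_mem]
      simp only [List.mem_filterMap]
      constructor
      · rintro ⟨r, hr, hm, rfl⟩
        exact ⟨act.getD r 0, hm, by rw [hg]; exact posIn_getD act hact r hr⟩
      · rintro ⟨c, hc, hgc⟩
        rw [hg] at hgc
        obtain ⟨r, hr, hgd, hv⟩ := posIn_some act c v hgc
        exact ⟨r, hr, hgd ▸ hc, hv⟩
    · exact (remapRow_pairwise act row).imp (fun h => ne_of_lt h)
    · apply hrow.filterMap
      intro a a' b hb hb'
      rw [hg] at hb hb'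
      obtain ⟨r, _, hga, hv⟩ := posIn_some act a b hb
      obtain ⟨r', _, hga', hv'⟩ := posIn_some act a' b hb'
      have : r = r' := by
        have := hv.symm.trans hv'
        exact_mod_cast this
      rw [← hga, ← hga', this]
  · exact remapRow_pairwise act row

theorem compress_spec (m : List (List Int)) (pairs : List (Int × Int)) (rem : PySem.Set Int)
    (hnod : ∀ r ∈ m, r.Nodup) :
    compressB m pairs rem =
      ((m.filter (fun r => !r.isEmpty)).map (remapRow (actOf rem pairs.length)),
        (actOf rem pairs.length).map (fun cc => pairs.getD cc.toNat (0, 0))) := by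
  obtain ⟨h2, h1⟩ := rankFold_go pairs rem (PySem.List.pyRange 0 (pairs.length : Int) 1)
    PySem.Dict.empty [] (PySem.List.nodup_pyRange_one _ _)
  have hact : (PySem.List.pyRange 0 ((pairs.length : Nat) : Int) 1).filter
      (fun x => !(PySem.Set.contains rem x)) = actOf rem pairs.length := rfl
  have hg : ∀ x, (rankFold pairs rem).1.get? x = posIn (actOf rem pairs.length) x := by
    intro x
    have hx : (rankFold pairs rem).1.get? x =
        match posIn ((PySem.List.pyRange 0 ((pairs.length : Nat) : Int) 1).filter
            (fun x => !(PySem.Set.contains rem x))) x with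
        | some k => some (((0 : Nat) : Int) + k)
        | none => (PySem.Dict.empty : PySem.Dict Int Int).get? x := h1 x
    rw [hx, hact]
    cases posIn (actOf rem pairs.length) x with
    | none => simp [PySem.Dict.get?_empty]
    | some k => simp
  unfold compressB
  refine Prod.ext ?_ ?_
  · simp only
    apply List.map_congr_left
    intro row hrow
    exact sortedRemap_eq (actOf rem pairs.length) row (actOf_nodup rem pairs.length)
      (hnod row (List.mem_of_mem_filter hrow)) _ hg
  · simp only
    have hx : (rankFold pairs rem).2 =
        ([] : List (Int × Int)) ++ ((PySem.List.pyRange 0 ((pairs.length : Nat) : Int) 1).filter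
            (fun x => !(PySem.Set.contains rem x))).map (fun c => pairs.getD c.toNat (0, 0)) := h2
    rw [hx, hact]
    simp

-- ===== round and outer equivalence =====
theorem remapRow_nodup (act : List Int) (row : List Int) : (remapRow act row).Nodup :=
  (remapRow_pairwise act row).imp (fun h => ne_of_lt h)

theorem roundAB_eq (m : List (List Int)) (p : List (Int × Int)) (hnod : ∀ r ∈ m, r.Nodup) :
    roundA m p = roundB m p := by
  simp only [roundA, roundB, enumSingles_eq]
  have hocc0 : ∀ c, (buildOcc m PySem.Dict.empty).getD c [] = occL m 0 c := by
    intro c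
    rw [buildOcc_getD _ _ _ hnod, PySem.Dict.getD_empty]
    simp
  rw [show PySem.List.pyRange 0 (p.length : Int) 1 = actOf PySem.Set.empty p.length from
    (actOf_empty p.length).symm]
  rw [cascade_eq p.length _ _ ⟨m, buildOcc m PySem.Dict.empty, PySem.Set.empty⟩ hnod hocc0]
  set CB := cascadeB (m.foldl (fun a r => a + r.length) 0 + (sglIdx m 0).reverse.length + 1)
    ((sglIdx m 0).reverse) ⟨m, buildOcc m PySem.Dict.empty, PySem.Set.empty⟩ with hCB
  simp only
  rw [PySem.List.sorted_eq_self_of_pairwise _ _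
    ((actOf_pairwise CB.2 p.length).imp (fun h => le_of_lt h))]
  have hnodc : ∀ r ∈ CB.1, r.Nodup := by
    have h := cascadeA_nodup (m.foldl (fun a r => a + r.length) 0 + (sglIdx m 0).reverse.length + 1)
      m ((sglIdx m 0).reverse) (actOf PySem.Set.empty p.length) hnod
    rw [cascade_eq p.length _ _ ⟨m, buildOcc m PySem.Dict.empty, PySem.Set.empty⟩ hnod hocc0] at h
    exact h
  rw [compress_spec CB.1 p CB.2 hnodc]
  set act1 := actOf CB.2 p.length with hact1
  set m2 := (CB.1.filter (fun r => !r.isEmpty)).map (remapRow act1) with hm2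
  set p1 := act1.map (fun cc => p.getD cc.toNat (0, 0)) with hp1
  simp only
  have hnod2 : ∀ r ∈ m2, r.Nodup := by
    intro r hr
    rw [hm2] at hr
    obtain ⟨r0, _, rfl⟩ := List.mem_map.1 hr
    exact remapRow_nodup act1 r0
  have hocc2 : ∀ c, (buildOcc m2 PySem.Dict.empty).getD c [] = occL m2 0 c := by
    intro c
    rw [buildOcc_getD _ _ _ hnod2, PySem.Dict.getD_empty]
    simp
  have htd : (p1.length : Int) - ((m2.length : Int) + 10)
      = (p1.length : Int) - (m2.length : Int) - 10 := by ring
  rw [show PySem.List.pyRange 0 (p1.length : Int) 1 = actOf PySem.Set.empty p1.length from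
    (actOf_empty p1.length).symm]
  rw [htd]
  obtain ⟨hnodR, hflat⟩ := p2Outer_spec p1.length (2 * p1.length + 5) (2 * p1.length + 4)
    ⟨m2, buildOcc m2 PySem.Dict.empty, PySem.Set.empty,
      (p1.length : Int) - (m2.length : Int) - 10, !(sglIdx m 0).reverse.isEmpty⟩ 2
    (by omega) hnod2 hocc2
  rw [hflat]
  set R := p2OuterB (2 * p1.length + 5) (2 * p1.length + 4)
    ⟨m2, buildOcc m2 PySem.Dict.empty, PySem.Set.empty,
      (p1.length : Int) - (m2.length : Int) - 10, !(sglIdx m 0).reverse.isEmpty⟩ 2 with hR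
  simp only
  rw [PySem.List.sorted_eq_self_of_pairwise _ _
    ((actOf_pairwise R.rem p1.length).imp (fun h => le_of_lt h))]
  rw [compress_spec R.mat p1 R.rem hnodR]

theorem roundA_nodup (m : List (List Int)) (p : List (Int × Int)) :
    ∀ r ∈ (roundA m p).1, r.Nodup := by
  intro r hr
  simp only [roundA] at hr
  obtain ⟨r0, _, rfl⟩ := List.mem_map.1 hr
  exact remapRow_nodup _ r0

theorem outerAB_eq : ∀ (fuel : Nat) (m : List (List Int)) (p : List (Int × Int)) (flag : Bool),
    (∀ r ∈ m, r.Nodup) →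
    (if flag then outerA fuel m p else (m, p)) = outerB fuel (m, p, flag) := by
  intro fuel
  induction fuel with
  | zero =>
    intro m p flag _
    cases flag <;> simp [outerA, outerB]
  | succ f ih =>
    intro m p flag hnod
    cases flag with
    | false => simp [outerB]
    | true =>
      simp only [if_pos trivial, outerA, outerB, if_pos rfl]
      rcases hr : roundA m p with ⟨m', p', fl⟩
      have hnod' : ∀ r ∈ m', r.Nodup := by
        have := roundA_nodup m p
        rw [hr] at this
        exact this
      have hround : roundB m p = (m', p', fl) := by rw [← roundAB_eq m p hnod, hr]
      rw [hround]
      have := ih m' p' fl hnod'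
      simpa using this

-- ===== VERDICT (by name: the statement is the Claim_ definition above) =====
theorem reduce_sparse_matrix_spec : Claim_equal_reduce_sparse_matrix := by
  intro matrix pairs _ hpre
  unfold Spec_reduce_sparse_matrix reduce_sparse_matrix reduce_sparse_matrix_alt
  have := outerAB_eq (matrix.length + 2) matrix pairs true hpre
  simpa using this
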